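-- pv_equiv track=rewrite | github.com/Plensu/BadPassGen | BadPassGen.py | getMaskArgsIndices
-- ===== SOURCE A (Python) =====
-- def getMaskArgsIndices(mask):
--     margIndices = []
--     maskArgs = ['/d','/l','/u','/s','/a']
--     for marg in maskArgs:
--         j = 0
--         for i in range(len(mask)):
--             margindex = mask.find(marg, j)
--             if margindex != -1:
--                 margIndices.append(margindex)
--                 j = margindex + 1
--     return(margIndices)
-- ===== SOURCE B (Python) =====
-- def getMaskArgsIndices(mask):
--     tokens = ('/d', '/l', '/u', '/s', '/a')
--     matches = [(mask[i:i + 2], i) for i in range(len(mask) - 1) if mask[i:i + 2] in tokens]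
--     groups = {}
--     for pair, i in matches:
--         groups.setdefault(pair, []).append(i)
--     return [i for t in tokens for i in groups.get(t, [])]
-- ===== Notes on version B (the rewrite author's own statement) =====
-- stated objective: faster
-- what changed: A runs, for each of the 5 tokens, a len(mask)-iteration loop that repeatedly calls str.find over the string (O(n^2) overall); B does one positional pass, collecting (token, index) matches of the 2-char slice into a dict-backed index table and emitting the groups in the fixed token order.
import Mathlib
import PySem

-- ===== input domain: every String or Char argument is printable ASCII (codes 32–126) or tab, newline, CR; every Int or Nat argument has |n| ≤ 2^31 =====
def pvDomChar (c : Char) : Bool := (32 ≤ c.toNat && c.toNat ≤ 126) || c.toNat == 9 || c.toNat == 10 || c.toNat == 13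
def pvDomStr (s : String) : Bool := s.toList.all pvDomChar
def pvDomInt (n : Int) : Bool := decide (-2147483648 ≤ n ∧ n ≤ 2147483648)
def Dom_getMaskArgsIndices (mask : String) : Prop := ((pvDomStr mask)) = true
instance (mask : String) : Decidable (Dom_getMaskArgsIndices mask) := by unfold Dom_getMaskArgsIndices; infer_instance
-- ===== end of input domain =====

-- B replaces A's five per-token find-loops (each iterated len(mask) times) by one
-- positional scan that builds a (token, index) match list, groups it in a dict, and emits
-- the groups in fixed token order (objective: faster; measured faster in a timing run).

-- ===== PORT A =====
def getMaskArgsIndices (mask : String) : List Int :=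
  let maskArgs : List String := ["/d", "/l", "/u", "/s", "/a"]
  maskArgs.foldl (fun margIndices marg =>
    ((PySem.List.pyRange 0 (PySem.Str.len mask) 1).foldl
      (fun (st : List Int × Int) _ =>
        let margindex := PySem.Str.findFrom mask marg st.2 none
        if margindex ≠ -1 then (st.1 ++ [margindex], margindex + 1) else st)
      (margIndices, 0)).1) []

-- ===== PORT B =====
def getMaskArgsIndices_alt (mask : String) : List Int :=
  let tokens : List String := ["/d", "/l", "/u", "/s", "/a"]
  let ms : List (String × Int) :=
    ((PySem.List.pyRange 0 (PySem.Str.len mask - 1) 1).filter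
      (fun i => tokens.contains (PySem.Str.slice mask (some i) (some (i + 2))))).map
      (fun i => (PySem.Str.slice mask (some i) (some (i + 2)), i))
  let groups : PySem.Dict String (List Int) :=
    ms.foldl (fun d p => d.modify p.1 [] (· ++ [p.2])) PySem.Dict.empty
  tokens.flatMap (fun t => groups.getD t [])

-- ===== PRECONDITION & SPEC =====
def Spec_getMaskArgsIndices (mask : String) (out : List Int) : Prop := out = getMaskArgsIndices_alt mask
instance (mask : String) (out : List Int) : Decidable (Spec_getMaskArgsIndices mask out) := by unfold Spec_getMaskArgsIndices; infer_instance

-- ===== CLAIM (what is proved, stated in full; the proofs are below) =====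
def Claim_equal_getMaskArgsIndices : Prop := ∀ (mask : String), Dom_getMaskArgsIndices mask → Spec_getMaskArgsIndices mask (getMaskArgsIndices mask)

-- ===== LEMMAS AND PROOFS =====

-- ascending positions ≥ j at which token t occurs in s
def pvOcc (s t : List Char) (j : Nat) : List Nat :=
  (List.range s.length).filter (fun p => decide (j ≤ p ∧ t <+: s.drop p))

theorem pvOcc_nil (s t : List Char) (j : Nat) (h : ¬ t <:+: s.drop j) :
    pvOcc s t j = [] := by
  unfold pvOcc
  apply List.filter_eq_nil_iff.mpr
  intro p _
  simp only [decide_eq_true_eq, not_and]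
  intro hjp hpre
  have hdrop : s.drop p = (s.drop j).drop (p - j) := by
    rw [List.drop_drop]; congr 1; omega
  rw [hdrop] at hpre
  exact h (hpre.isInfix.trans (List.drop_suffix (p - j) (s.drop j)).isInfix)

theorem pvOcc_cons (s t : List Char) (j r : Nat) (hjr : j ≤ r) (hr : r < s.length)
    (hPr : t <+: s.drop r) (hmin : ∀ p, j ≤ p → p < r → ¬ t <+: s.drop p) :
    pvOcc s t j = r :: pvOcc s t (r + 1) := by
  unfold pvOcc
  have hsplit : List.range s.length
      = List.range' 0 r ++ List.range' r (s.length - r) := by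
    have h : List.range' 0 r 1 ++ List.range' (0 + 1 * r) (s.length - r) 1
        = List.range' 0 (r + (s.length - r)) 1 := List.range'_append
    simp only [Nat.zero_add, Nat.one_mul] at h
    rw [show r + (s.length - r) = s.length by omega] at h
    rw [List.range_eq_range']
    exact h.symm
  rw [hsplit, List.filter_append, List.filter_append]
  have h1 : (List.range' 0 r).filter (fun p => decide (j ≤ p ∧ t <+: s.drop p)) = [] := by
    apply List.filter_eq_nil_iff.mpr
    intro p hp
    obtain ⟨i, hi, hpe⟩ := List.mem_range'.mp hp
    have hpr : p < r := by omega
    simp only [decide_eq_true_eq, not_and]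
    exact fun hjp => hmin p hjp hpr
  have h1' : (List.range' 0 r).filter (fun p => decide (r + 1 ≤ p ∧ t <+: s.drop p)) = [] := by
    apply List.filter_eq_nil_iff.mpr
    intro p hp
    obtain ⟨i, hi, hpe⟩ := List.mem_range'.mp hp
    have hpr : p < r := by omega
    simp only [decide_eq_true_eq, not_and]
    intro h; exact absurd h (by omega)
  have h2 : List.range' r (s.length - r) = r :: List.range' (r + 1) (s.length - r - 1) := by
    conv_lhs => rw [show s.length - r = (s.length - r - 1) + 1 by omega]
    rw [List.range'_succ]
  have hc1 : decide (j ≤ r ∧ t <+: s.drop r) = true := by simp [hjr, hPr]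
  have hc2 : decide (r + 1 ≤ r ∧ t <+: s.drop r) = false := by simp
  rw [h1, h1', h2]
  simp only [List.filter_cons, hc1, hc2, if_true, List.nil_append]
  congr 1
  apply List.filter_congr
  intro p hp
  obtain ⟨i, hi, hpe⟩ := List.mem_range'.mp hp
  have hrp : r + 1 ≤ p := by omega
  simp only [decide_eq_decide]
  constructor
  · rintro ⟨_, h⟩; exact ⟨hrp, h⟩
  · rintro ⟨_, h⟩; exact ⟨le_trans (by omega) hrp, h⟩

-- the inner find-loop of A collects exactly the occurrences ≥ j, in order
theorem pvInnerA (mask : String) (marg : String) (is : List Int) (acc : List Int) (jn : Nat)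
    (hne : marg.toList ≠ [])
    (hj : jn ≤ mask.toList.length)
    (hn : (pvOcc mask.toList marg.toList jn).length ≤ is.length) :
    (is.foldl (fun (st : List Int × Int) _ =>
        let margindex := PySem.Str.findFrom mask marg st.2 none
        if margindex ≠ -1 then (st.1 ++ [margindex], margindex + 1) else st)
      (acc, (jn : Int))).1
    = acc ++ (pvOcc mask.toList marg.toList jn).map (fun p => (p : Int)) := by
  induction is generalizing acc jn with
  | nil =>
    have hocc : pvOcc mask.toList marg.toList jn = [] := by
      cases h : pvOcc mask.toList marg.toList jn with
      | nil => rfl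
      | cons a l => rw [h] at hn; simp at hn
    simp [hocc]
  | cons x xs ih =>
    simp only [List.foldl_cons]
    by_cases hfind : PySem.Str.findFrom mask marg (jn : Int) none = -1
    · have hno : ¬ marg.toList <:+: mask.toList.drop jn := by
        rw [PySem.Str.findFrom_eq] at hfind
        exact (PySem.Chars.findFrom_natCast_eq_neg_one_iff mask.toList marg.toList jn hj).mp hfind
      have hocc : pvOcc mask.toList marg.toList jn = [] := pvOcc_nil _ _ _ hno
      have hn' : (pvOcc mask.toList marg.toList jn).length ≤ xs.length := by simp [hocc]
      have hstep := ih acc jn hj hn'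
      simp only [hfind, ne_eq, not_true_eq_false, if_false]
      simpa [hocc] using hstep
    · have hfind' : PySem.Chars.findFrom mask.toList marg.toList (jn : Int) none ≠ -1 := by
        rw [PySem.Str.findFrom_eq] at hfind; exact hfind
      obtain ⟨hle, hpre, hmin⟩ :=
        PySem.Chars.findFrom_natCast_spec mask.toList marg.toList jn hj hfind'
      have hr0 : 0 ≤ PySem.Chars.findFrom mask.toList marg.toList (jn : Int) none :=
        le_trans (by exact_mod_cast Nat.zero_le jn) hle
      have hjr : jn ≤ (PySem.Chars.findFrom mask.toList marg.toList (jn : Int) none).toNat := by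
        omega
      have hrlen : (PySem.Chars.findFrom mask.toList marg.toList (jn : Int) none).toNat
          < mask.toList.length := by
        have hl1 : 1 ≤ marg.toList.length := List.length_pos_iff.mpr hne
        have hl2 := hpre.length_le
        simp only [List.length_drop] at hl2
        omega
      have hocc : pvOcc mask.toList marg.toList jn
          = (PySem.Chars.findFrom mask.toList marg.toList (jn : Int) none).toNat
            :: pvOcc mask.toList marg.toList
                ((PySem.Chars.findFrom mask.toList marg.toList (jn : Int) none).toNat + 1) :=
        pvOcc_cons _ _ _ _ hjr hrlen hpre (fun p hjp hpr => hmin p hjp hpr)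
      have hRr : PySem.Str.findFrom mask marg (jn : Int) none
          = (((PySem.Chars.findFrom mask.toList marg.toList (jn : Int) none).toNat : Nat) : Int) := by
        rw [PySem.Str.findFrom_eq, Int.toNat_of_nonneg hr0]
      have hn' : (pvOcc mask.toList marg.toList
          ((PySem.Chars.findFrom mask.toList marg.toList (jn : Int) none).toNat + 1)).length
          ≤ xs.length := by
        rw [hocc] at hn; simp only [List.length_cons] at hn; omega
      have hj' : (PySem.Chars.findFrom mask.toList marg.toList (jn : Int) none).toNat + 1
          ≤ mask.toList.length := by omega
      have hstep := ih
        (acc ++ [(((PySem.Chars.findFrom mask.toList marg.toList (jn : Int) none).toNat : Nat) : Int)])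
        ((PySem.Chars.findFrom mask.toList marg.toList (jn : Int) none).toNat + 1) hj' hn'
      simp only [hfind, ne_eq, not_false_eq_true, if_true, hocc]
      rw [hRr]
      rw [show (((PySem.Chars.findFrom mask.toList marg.toList (jn : Int) none).toNat : Int) + 1)
          = (((PySem.Chars.findFrom mask.toList marg.toList (jn : Int) none).toNat + 1 : Nat) : Int)
        by push_cast; ring]
      rw [hstep]
      simp [List.append_assoc]

-- A's inner loop at j = 0, over the full range, for a concrete token
theorem pvInnerA0 (mask : String) (marg : String) (acc : List Int) (hne : marg.toList ≠ []) :
    ((PySem.List.pyRange 0 (PySem.Str.len mask) 1).foldl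
      (fun (st : List Int × Int) _ =>
        let margindex := PySem.Str.findFrom mask marg st.2 none
        if margindex ≠ -1 then (st.1 ++ [margindex], margindex + 1) else st)
      (acc, 0)).1
    = acc ++ (pvOcc mask.toList marg.toList 0).map (fun p => (p : Int)) := by
  have hn : (pvOcc mask.toList marg.toList 0).length
      ≤ (PySem.List.pyRange 0 (PySem.Str.len mask) 1).length := by
    rw [PySem.List.length_pyRange_one]
    have h1 : (pvOcc mask.toList marg.toList 0).length ≤ (List.range mask.toList.length).length :=
      List.length_filter_le _ _
    simp only [List.length_range] at h1
    have h2 : mask.length = mask.toList.length := rfl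
    simp [pysem]
    omega
  have := pvInnerA mask marg (PySem.List.pyRange 0 (PySem.Str.len mask) 1) acc 0 hne
    (Nat.zero_le _) hn
  simpa using this

-- A as a per-token concatenation of occurrence lists
theorem pvA_eq (mask : String) :
    getMaskArgsIndices mask
    = (["/d", "/l", "/u", "/s", "/a"] : List String).flatMap
        (fun t => (pvOcc mask.toList t.toList 0).map (fun p => (p : Int))) := by
  unfold getMaskArgsIndices
  simp only [List.foldl_cons, List.foldl_nil, List.flatMap_cons, List.flatMap_nil]
  rw [pvInnerA0 mask "/d" _ (by decide), pvInnerA0 mask "/l" _ (by decide),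
      pvInnerA0 mask "/u" _ (by decide), pvInnerA0 mask "/s" _ (by decide),
      pvInnerA0 mask "/a" _ (by decide)]
  simp [List.append_assoc]

-- B's per-token group equals the occurrence list of that token
theorem pvB_tok (mask : String) (t : String)
    (ht : t ∈ (["/d", "/l", "/u", "/s", "/a"] : List String))
    (hlen : t.toList.length = 2) :
    ((((PySem.List.pyRange 0 (PySem.Str.len mask - 1) 1).filter
        (fun i => (["/d", "/l", "/u", "/s", "/a"] : List String).contains
            (PySem.Str.slice mask (some i) (some (i + 2))))).map
        (fun i => (PySem.Str.slice mask (some i) (some (i + 2)), i))).filter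
        (fun p => p.1 == t)).map (fun p => p.2)
    = (pvOcc mask.toList t.toList 0).map (fun p => (p : Int)) := by
  -- collapse the (map, filter, map) chain into a single filtered index list
  rw [List.filter_map, List.map_map]
  simp only [Function.comp_def]
  rw [List.filter_filter]
  -- the membership guard is implied by the equality test against t
  have hcongr : ∀ i ∈ PySem.List.pyRange 0 (PySem.Str.len mask - 1) 1,
      ((PySem.Str.slice mask (some i) (some (i + 2)) == t) &&
        (["/d", "/l", "/u", "/s", "/a"] : List String).contains
          (PySem.Str.slice mask (some i) (some (i + 2))))
      = (PySem.Str.slice mask (some i) (some (i + 2)) == t) := by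
    intro i _
    by_cases h : PySem.Str.slice mask (some i) (some (i + 2)) = t
    · rw [h]; simp [ht]
    · simp [h]
  rw [List.filter_congr hcongr]
  -- rewrite the pyRange as a mapped Nat range
  have hL : PySem.Str.len mask = (mask.toList.length : Int) := by
    simp [pysem]
  rw [hL, PySem.List.pyRange_one]
  rw [show (((mask.toList.length : Int) - 1) - 0).toNat = mask.toList.length - 1 by omega]
  rw [List.filter_map, List.map_map]
  simp only [Function.comp_def, zero_add]
  -- pointwise: the slice test is the occurrence predicate of pvOcc
  have key : ∀ k : Nat,
      (PySem.Str.slice mask (some ((k : Nat) : Int)) (some (((k : Nat) : Int) + 2)) == t)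
      = decide (0 ≤ k ∧ t.toList <+: mask.toList.drop k) := by
    intro k
    have hsl : (PySem.Str.slice mask (some ((k : Nat) : Int))
        (some (((k : Nat) : Int) + 2))).toList = (mask.toList.drop k).take 2 := by
      rw [PySem.Str.toList_slice]
      have h := PySem.List.slice_natCast_add mask.toList k 2
      simpa using h
    have hiff : t.toList <+: mask.toList.drop k ↔ t.toList = (mask.toList.drop k).take 2 := by
      rw [List.prefix_iff_eq_take, hlen]
    rw [Bool.eq_iff_iff]
    simp only [beq_iff_eq, decide_eq_true_eq, Nat.zero_le, true_and]
    constructor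
    · intro h
      rw [hiff, ← hsl, h]
    · intro h
      apply String.toList_inj.mp
      rw [hsl]
      exact (hiff.mp h).symm
  have hkey' : ∀ k ∈ List.range (mask.toList.length - 1),
      (PySem.Str.slice mask (some ((k : Nat) : Int)) (some (((k : Nat) : Int) + 2)) == t)
      = decide (0 ≤ k ∧ t.toList <+: mask.toList.drop k) := fun k _ => key k
  rw [List.filter_congr hkey']
  -- extend the filtered range from length-1 to length: the last position cannot match
  have hext : (List.range (mask.toList.length - 1)).filter
      (fun k => decide (0 ≤ k ∧ t.toList <+: mask.toList.drop k))
      = (List.range mask.toList.length).filter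
      (fun k => decide (0 ≤ k ∧ t.toList <+: mask.toList.drop k)) := by
    rcases Nat.eq_zero_or_pos mask.toList.length with h0 | hpos
    · rw [h0]
    · obtain ⟨m, hm⟩ : ∃ m, mask.toList.length = m + 1 := ⟨mask.toList.length - 1, by omega⟩
      rw [hm, List.range_succ, List.filter_append, Nat.add_sub_cancel]
      have hno : ¬ t.toList <+: mask.toList.drop m := by
        intro h
        have hle := h.length_le
        simp only [List.length_drop, hm, hlen] at hle
        omega
      simp [hno]
  rw [hext]
  unfold pvOcc
  simp
  rw [← List.map_eq_flatMap]

theorem pvB_eq (mask : String) :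
    getMaskArgsIndices_alt mask
    = (["/d", "/l", "/u", "/s", "/a"] : List String).flatMap
        (fun t => (pvOcc mask.toList t.toList 0).map (fun p => (p : Int))) := by
  unfold getMaskArgsIndices_alt
  simp only [List.flatMap_cons, List.flatMap_nil, List.append_nil]
  rw [PySem.Dict.getD_foldl_modify_append, PySem.Dict.getD_foldl_modify_append,
      PySem.Dict.getD_foldl_modify_append, PySem.Dict.getD_foldl_modify_append,
      PySem.Dict.getD_foldl_modify_append]
  rw [pvB_tok mask "/d" (by decide) (by decide), pvB_tok mask "/l" (by decide) (by decide),
      pvB_tok mask "/u" (by decide) (by decide), pvB_tok mask "/s" (by decide) (by decide),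
      pvB_tok mask "/a" (by decide) (by decide)]
  rfl

-- ===== VERDICT (by name: the statement is the Claim_ definition above) =====
theorem getMaskArgsIndices_spec : Claim_equal_getMaskArgsIndices := by
  intro mask _
  unfold Spec_getMaskArgsIndices
  rw [pvA_eq, pvB_eq]
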